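-- pv_equiv track=rewrite | github.com/olitskaya/HT_5 | task_1.py | user
-- ===== SOURCE A (Python) =====
-- class LoginException(Exception):
--     pass
--
-- def user(username, password, silent=False):
--     users = {'username1': 'password1', 'username2': 'password2', 'username3': 'password3',
--             'username4': 'password4', 'username5': 'password5'}
--     for key, value in users.items():
--         if (username == key and password == value):
--             return True
--         if (username != key and password != value and silent == True):
--             return False
--         if (username != key and password != value and silent == False):
--             raise LoginException("Wrong login and password!")
-- ===== SOURCE B (Python) =====
-- class LoginException(Exception):
--     pass
--
-- def user(username, password, silent=False):
--     # Only the first dict entry can ever validate in A (all keys/values distinct),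
--     # so a direct guard suffices.
--     if username == 'username1' and password == 'password1':
--         return True
--     if silent:
--         return False
--     raise LoginException("Wrong login and password!")
-- ===== Notes on version B (the rewrite author's own statement) =====
-- stated objective: simpler
-- what changed: B replaces the dict scan with a single direct guard on ('username1','password1'), since A's loop order means only the first entry can ever validate.
import Mathlib
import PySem

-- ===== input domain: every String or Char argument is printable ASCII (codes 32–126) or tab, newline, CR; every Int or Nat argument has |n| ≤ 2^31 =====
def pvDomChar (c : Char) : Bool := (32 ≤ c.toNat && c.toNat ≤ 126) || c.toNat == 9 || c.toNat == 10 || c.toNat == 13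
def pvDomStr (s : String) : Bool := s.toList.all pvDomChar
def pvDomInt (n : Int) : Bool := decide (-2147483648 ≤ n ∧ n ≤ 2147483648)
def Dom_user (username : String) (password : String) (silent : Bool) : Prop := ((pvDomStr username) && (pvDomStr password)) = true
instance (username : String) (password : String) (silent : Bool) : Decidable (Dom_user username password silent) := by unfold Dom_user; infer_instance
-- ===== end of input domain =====

-- B replaces A's dict scan with a single direct guard on the first entry (only it can ever
-- validate given A's loop order); equivalence of the RETURN value on Pre_ (where A does not raise).

-- ===== PORT A =====
-- A's loop over users.items(); 'none' = Python's raise / fall-off-the-end None (excluded by Pre_).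
def userLoop (username : String) (password : String) (silent : Bool) :
    List (String × String) → Option Bool
  | [] => none
  | (key, value) :: rest =>
    if username = key ∧ password = value then some true
    else if username ≠ key ∧ password ≠ value ∧ silent = true then some false
    else if username ≠ key ∧ password ≠ value ∧ silent = false then none
    else userLoop username password silent rest

def user (username : String) (password : String) (silent : Bool) : Bool :=
  (userLoop username password silent
    [("username1","password1"), ("username2","password2"), ("username3","password3"),
     ("username4","password4"), ("username5","password5")]).getD false

-- ===== PORT B =====
def user_alt (username : String) (password : String) (silent : Bool) : Bool :=
  if username = "username1" ∧ password = "password1" then true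
  else if silent then false
  else false  -- B raises LoginException here; these inputs lie outside Pre_user

-- ===== PRECONDITION & SPEC =====
-- A (and B) raise LoginException exactly when silent is false and the pair is not user1's.
def Pre_user (username : String) (password : String) (silent : Bool) : Prop :=
  silent = true ∨ (username = "username1" ∧ password = "password1")
instance (username : String) (password : String) (silent : Bool) : Decidable (Pre_user username password silent) := by unfold Pre_user; infer_instance

def pvWitness_user : String × String × Bool := ("username1", "password1", false)

def Spec_user (username : String) (password : String) (silent : Bool) (out : Bool) : Prop := out = user_alt username password silent
instance (username : String) (password : String) (silent : Bool) (out : Bool) : Decidable (Spec_user username password silent out) := by unfold Spec_user; infer_instance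

-- ===== CLAIM (what is proved, stated in full; the proofs are below) =====
def Claim_equal_user : Prop := ∀ (username : String) (password : String) (silent : Bool), Dom_user username password silent → Pre_user username password silent → Spec_user username password silent (user username password silent)

-- ===== LEMMAS AND PROOFS =====

-- ===== VERDICT (by name: the statement is the Claim_ definition above) =====
theorem user_spec : Claim_equal_user := by
  intro u p s _ hpre
  unfold Spec_user user user_alt userLoop
  rcases hpre with hs | ⟨hu, hp⟩
  · subst hs
    by_cases h1 : u = "username1" <;> by_cases h2 : p = "password1" <;>
      by_cases h3 : u = "username2" <;> by_cases h4 : p = "password2" <;>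
      by_cases h5 : u = "username3" <;> by_cases h6 : p = "password3" <;>
      simp_all [userLoop]
  · subst hu; subst hp; simp
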